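-- pv_equiv track=rewrite | github.com/Tch0um/MingMang | mingmang/deplacement.py | victoirepions
-- ===== SOURCE A (Python) =====
-- def victoirepions(taille):
--     noir=0
--     blanc=0
--     for i in range(taille):
--         for j in range(taille):
--             if j==1:
--                 blanc+=1
--             if j==2:
--                 noir+=1
--     return (blanc,noir)
-- ===== SOURCE B (Python) =====
-- def victoirepions(taille):
--     # closed form: each of the taille rows contributes one j==1 hit iff taille>=2
--     # and one j==2 hit iff taille>=3
--     blanc = taille if taille >= 2 else 0
--     noir = taille if taille >= 3 else 0
--     return (blanc, noir)
-- ===== Notes on version B (the rewrite author's own statement) =====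
-- stated objective: faster
-- what changed: Replaced the O(n^2) nested counting loops by the closed-form values blanc = taille if taille>=2 else 0 and noir = taille if taille>=3 else 0.
import Mathlib
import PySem

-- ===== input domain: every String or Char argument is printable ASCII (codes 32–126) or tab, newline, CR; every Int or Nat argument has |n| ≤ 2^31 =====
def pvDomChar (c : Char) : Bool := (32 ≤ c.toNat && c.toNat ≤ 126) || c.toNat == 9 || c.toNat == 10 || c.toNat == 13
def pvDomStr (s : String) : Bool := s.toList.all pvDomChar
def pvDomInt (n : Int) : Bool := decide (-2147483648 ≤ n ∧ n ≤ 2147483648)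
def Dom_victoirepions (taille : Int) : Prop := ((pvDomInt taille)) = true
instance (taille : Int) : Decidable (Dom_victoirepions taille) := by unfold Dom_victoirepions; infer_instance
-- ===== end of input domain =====

-- B replaces A's O(n^2) nested counting loops by a closed form (objective: faster).

-- ===== PORT A =====
-- the inner loop body: for j, bump blanc on j==1 and noir on j==2 (state = (blanc, noir))
def pvStepA (s : Int × Int) (j : Int) : Int × Int :=
  let s1 := if j == 1 then (s.1 + 1, s.2) else s
  if j == 2 then (s1.1, s1.2 + 1) else s1

def victoirepions (taille : Int) : List Int :=
  let st := (PySem.List.pyRange 0 taille 1).foldl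
    (fun (s : Int × Int) _i => (PySem.List.pyRange 0 taille 1).foldl pvStepA s)
    (0, 0)
  [st.1, st.2]

-- ===== PORT B =====
def victoirepions_alt (taille : Int) : List Int :=
  let blanc : Int := if taille ≥ 2 then taille else 0
  let noir : Int := if taille ≥ 3 then taille else 0
  [blanc, noir]

-- ===== PRECONDITION & SPEC =====
def Spec_victoirepions (taille : Int) (out : List Int) : Prop := out = victoirepions_alt taille
instance (taille : Int) (out : List Int) : Decidable (Spec_victoirepions taille out) := by unfold Spec_victoirepions; infer_instance

-- ===== CLAIM (what is proved, stated in full; the proofs are below) =====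
def Claim_equal_victoirepions : Prop := ∀ (taille : Int), Dom_victoirepions taille → Spec_victoirepions taille (victoirepions taille)

-- ===== LEMMAS AND PROOFS =====

-- the inner loop counts occurrences of 1 and 2 in the traversed list
lemma pv_inner (L : List Int) (s : Int × Int) :
    L.foldl pvStepA s = (s.1 + (L.count 1 : Int), s.2 + (L.count 2 : Int)) := by
  induction L generalizing s with
  | nil => simp
  | cons j t ih =>
    simp only [List.foldl_cons, ih, List.count_cons]
    unfold pvStepA
    by_cases h1 : j = 1 <;> by_cases h2 : j = 2 <;>
      simp [h1, h2] <;> ring_nf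

-- the outer loop adds the same pair 'c' once per element
lemma pv_outer (L : List Int) (c : Int × Int) (s : Int × Int) :
    L.foldl (fun (s : Int × Int) _i => (s.1 + c.1, s.2 + c.2)) s
      = (s.1 + L.length * c.1, s.2 + L.length * c.2) := by
  induction L generalizing s with
  | nil => simp
  | cons j t ih =>
    simp only [List.foldl_cons, ih, List.length_cons]
    refine Prod.ext ?_ ?_ <;> push_cast <;> ring

lemma pv_count_range (taille x : Int) (hx : 0 ≤ x) :
    ((PySem.List.pyRange 0 taille 1).count x : Int) = if x < taille then 1 else 0 := by
  have hnd := PySem.List.nodup_pyRange_one (a := 0) (b := taille)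
  by_cases h : x < taille
  · have hm : x ∈ PySem.List.pyRange 0 taille 1 := by
      rw [PySem.List.mem_pyRange_one]; exact ⟨hx, h⟩
    simp [h, List.count_eq_one_of_mem hnd hm]
  · have hm : x ∉ PySem.List.pyRange 0 taille 1 := by
      rw [PySem.List.mem_pyRange_one]; omega
    simp [h, List.count_eq_zero_of_not_mem hm]

-- ===== VERDICT (by name: the statement is the Claim_ definition above) =====
theorem victoirepions_spec : Claim_equal_victoirepions := by
  intro taille _
  unfold Spec_victoirepions victoirepions victoirepions_alt
  have hinner : ∀ s : Int × Int,
      (PySem.List.pyRange 0 taille 1).foldl pvStepA s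
        = (s.1 + (if (1:Int) < taille then 1 else 0), s.2 + (if (2:Int) < taille then 1 else 0)) := by
    intro s
    rw [pv_inner, pv_count_range taille 1 (by omega), pv_count_range taille 2 (by omega)]
  have houter :
      (PySem.List.pyRange 0 taille 1).foldl
        (fun (s : Int × Int) _i => (PySem.List.pyRange 0 taille 1).foldl pvStepA s) (0, 0)
      = (((PySem.List.pyRange 0 taille 1).length : Int) * (if (1:Int) < taille then 1 else 0),
         ((PySem.List.pyRange 0 taille 1).length : Int) * (if (2:Int) < taille then 1 else 0)) := by
    have hf : (fun (s : Int × Int) (_i : Int) => (PySem.List.pyRange 0 taille 1).foldl pvStepA s)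
        = (fun (s : Int × Int) (_i : Int) =>
            (s.1 + (if (1:Int) < taille then 1 else 0), s.2 + (if (2:Int) < taille then 1 else 0))) := by
      funext s _i; exact hinner s
    rw [hf, pv_outer (PySem.List.pyRange 0 taille 1)
      ((if (1:Int) < taille then 1 else 0), (if (2:Int) < taille then 1 else 0)) (0, 0)]
    simp
  rw [houter]
  rw [PySem.List.length_pyRange_one]
  split_ifs <;> simp_all <;> omega
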